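-- pv_equiv track=rewrite | github.com/DimitryKrakitov/AIDS | oldcode/provFunctions.py | simplify_2
-- ===== SOURCE A (Python) =====
-- import copy
--
-- def simplify_2(cnf, literals):
--     cnf_2 = copy.copy(cnf)
--
--     for i in cnf:
--         for l in literals:
--             if (l in i) and (("-" + l) in i):
--                 cnf_2.remove(i)
--                 break
--     return cnf_2
-- ===== SOURCE B (Python) =====
-- def simplify_2(cnf, literals):
--     lits = set(literals)
--
--     def _taut(c):
--         sc = set(c)
--         return any(e in lits and ('-' + e) in sc for e in c)
--
--     return [c for c in cnf if not _taut(c)]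
-- ===== Notes on version B (the rewrite author's own statement) =====
-- stated objective: simpler
-- what changed: A mutates a copy of cnf, scanning the external literals list per clause and calling list.remove; B is a single filter comprehension whose tautology test scans the clause's own literals against a prebuilt literal set and a per-clause set.
import Mathlib
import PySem

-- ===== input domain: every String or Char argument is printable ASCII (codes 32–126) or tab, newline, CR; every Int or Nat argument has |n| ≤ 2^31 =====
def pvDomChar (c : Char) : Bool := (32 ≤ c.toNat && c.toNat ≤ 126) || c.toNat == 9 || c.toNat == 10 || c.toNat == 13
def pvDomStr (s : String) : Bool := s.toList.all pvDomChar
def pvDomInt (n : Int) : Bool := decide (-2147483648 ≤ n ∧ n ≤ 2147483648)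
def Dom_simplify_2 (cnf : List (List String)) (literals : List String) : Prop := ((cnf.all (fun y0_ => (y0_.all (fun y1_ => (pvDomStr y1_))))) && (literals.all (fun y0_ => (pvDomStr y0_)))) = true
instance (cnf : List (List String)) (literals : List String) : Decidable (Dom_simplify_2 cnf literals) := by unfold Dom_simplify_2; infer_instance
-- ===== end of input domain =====

-- B replaces A's copy-and-remove loop over the external literal list by a single filter
-- whose tautology test scans the clause's own literals (objective: simpler).

-- ===== PORT A =====
-- inner 'for l in literals: if (l in i) and (("-" + l) in i): …; break' — true iff the break fires
def innerA (i : List String) : List String → Bool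
  | [] => false
  | l :: rest => if i.contains l && i.contains ("-" ++ l) then true else innerA i rest

-- 'cnf_2.remove(i)' = erase first occurrence equal to i; i is always present in cnf_2 here
-- (each clause triggers at most one removal of its value per occurrence), so List.erase is exact.
def simplify_2 (cnf : List (List String)) (literals : List String) : List (List String) :=
  cnf.foldl (fun cnf_2 i => if innerA i literals then cnf_2.erase i else cnf_2) cnf

-- ===== PORT B =====
def tautB (lits : PySem.Set String) (c : List String) : Bool :=
  let sc := PySem.Set.ofList c
  c.any (fun e => lits.contains e && sc.contains ("-" ++ e))

def simplify_2_alt (cnf : List (List String)) (literals : List String) : List (List String) :=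
  let lits := PySem.Set.ofList literals
  cnf.filter (fun c => !(tautB lits c))

-- ===== PRECONDITION & SPEC =====
def Spec_simplify_2 (cnf : List (List String)) (literals : List String) (out : List (List String)) : Prop := out = simplify_2_alt cnf literals
instance (cnf : List (List String)) (literals : List String) (out : List (List String)) : Decidable (Spec_simplify_2 cnf literals out) := by unfold Spec_simplify_2; infer_instance

-- ===== CLAIM (what is proved, stated in full; the proofs are below) =====
def Claim_equal_simplify_2 : Prop := ∀ (cnf : List (List String)) (literals : List String), Dom_simplify_2 cnf literals → Spec_simplify_2 cnf literals (simplify_2 cnf literals)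

-- ===== LEMMAS AND PROOFS =====

lemma innerA_iff (i : List String) (ls : List String) :
    innerA i ls = true ↔ ∃ l ∈ ls, l ∈ i ∧ ("-" ++ l) ∈ i := by
  induction ls with
  | nil => simp [innerA]
  | cons l rest ih =>
    by_cases h : (i.contains l && i.contains ("-" ++ l)) = true
    · rw [innerA, if_pos h]
      simp only [Bool.and_eq_true, List.contains_eq_mem, decide_eq_true_eq] at h
      simp only [true_iff]
      exact ⟨l, List.mem_cons_self .., h.1, h.2⟩
    · rw [innerA, if_neg h, ih]
      constructor
      · rintro ⟨x, hx, hi⟩; exact ⟨x, List.mem_cons_of_mem _ hx, hi⟩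
      · rintro ⟨x, hx, hi⟩
        rcases List.mem_cons.mp hx with rfl | hx
        · exact absurd (by simp [List.contains_eq_mem, hi.1, hi.2]) h
        · exact ⟨x, hx, hi⟩

lemma tautB_iff (ls : List String) (c : List String) :
    tautB (PySem.Set.ofList ls) c = true ↔ ∃ l ∈ ls, l ∈ c ∧ ("-" ++ l) ∈ c := by
  simp only [tautB, List.any_eq_true, Bool.and_eq_true, PySem.Set.contains,
    List.contains_eq_mem, decide_eq_true_eq, PySem.Set.mem_ofList]
  constructor
  · rintro ⟨e, he, hl, hn⟩; exact ⟨e, hl, he, hn⟩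
  · rintro ⟨l, hl, hc, hn⟩; exact ⟨l, hc, hl, hn⟩

lemma pred_eq (ls : List String) (i : List String) :
    innerA i ls = tautB (PySem.Set.ofList ls) i := by
  rcases h : tautB (PySem.Set.ofList ls) i with _ | _
  · rw [← Bool.not_eq_true] at h ⊢
    rw [innerA_iff]; rw [tautB_iff] at h; exact h
  · rw [innerA_iff]; exact (tautB_iff ls i).mp h

-- A's fold erases, from an accumulator 'pre ++ xs' whose prefix holds no p-element,
-- one occurrence per p-element of xs: the result is the p-free filter of xs after pre.
lemma foldl_erase_filter (p : List String → Bool) :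
    ∀ (xs pre : List (List String)), (∀ a ∈ pre, p a = false) →
      xs.foldl (fun acc i => if p i then acc.erase i else acc) (pre ++ xs)
        = pre ++ xs.filter (fun x => !p x) := by
  intro xs
  induction xs with
  | nil => simp
  | cons i rest ih =>
    intro pre hpre
    by_cases hp : p i = true
    · have hnotmem : i ∉ pre := fun hm => by simp [hpre i hm] at hp
      have herase : (pre ++ i :: rest).erase i = pre ++ rest := by
        rw [List.erase_append_right _ (by simpa using hnotmem), List.erase_cons_head]
      rw [List.foldl_cons, if_pos hp, herase, ih pre hpre, List.filter_cons]
      simp [hp]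
    · have hp' : p i = false := by simpa using hp
      have hpre' : ∀ a ∈ pre ++ [i], p a = false := by
        intro a ha
        rcases List.mem_append.mp ha with h | h
        · exact hpre a h
        · simp only [List.mem_singleton] at h; subst h; exact hp'
      have := ih (pre ++ [i]) hpre'
      simp only [List.foldl_cons, hp', if_neg, Bool.false_eq_true, not_false_eq_true]
      calc List.foldl (fun acc i => if p i then acc.erase i else acc) (pre ++ i :: rest) rest
          = List.foldl (fun acc i => if p i then acc.erase i else acc) ((pre ++ [i]) ++ rest) rest := by
            simp
        _ = (pre ++ [i]) ++ rest.filter (fun x => !p x) := this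
        _ = pre ++ (i :: rest).filter (fun x => !p x) := by
            simp [hp']

-- ===== VERDICT (by name: the statement is the Claim_ definition above) =====
theorem simplify_2_spec : Claim_equal_simplify_2 := by
  intro cnf literals _
  show simplify_2 cnf literals = simplify_2_alt cnf literals
  unfold simplify_2 simplify_2_alt
  have h := foldl_erase_filter (fun i => innerA i literals) cnf [] (by simp)
  simp only [List.nil_append] at h
  rw [h]
  exact List.filter_congr (fun x _ => by rw [Bool.not_inj_iff, pred_eq])
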